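-- pv_equiv track=rewrite | github.com/iamlogand/republic-of-rome-online | rorcli/parsers/rules.py | compute_parent
-- ===== SOURCE A (Python) =====
-- def compute_parent(section_id: str, all_ids: set[str]) -> str | None:
--     """
--     Infer parent by progressively stripping the rightmost digit of the last
--     dot-segment.  Falls back to the prefix (one level up in the dot hierarchy).
--
--     Examples
--     --------
--     1.09.12   → tries 1.09.1  → if found, returns it; else returns 1.09
--     1.07.3321 → tries 1.07.332, 1.07.33, 1.07.3, 1.07
--     1.09      → tries 1.0 … → falls back to "1"
--     1         → None  (top-level)
--     """
--     parts = section_id.split(".")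
--     if len(parts) == 1:
--         return None  # top-level
--
--     last = parts[-1]
--     prefix = ".".join(parts[:-1])
--
--     # Try shorter versions of the last segment first
--     for i in range(len(last) - 1, 0, -1):
--         candidate = f"{prefix}.{last[:i]}"
--         if candidate in all_ids:
--             return candidate
--
--     # Fall back to the prefix itself
--     if prefix in all_ids:
--         return prefix
--
--     # Prefix not in DB — recurse upward (handles missing intermediate levels)
--     if "." in prefix:
--         return compute_parent(prefix, all_ids)
--
--     return None  # single-segment prefix that doesn't exist in DB
-- ===== SOURCE B (Python) =====
-- def compute_parent(section_id: str, all_ids: set[str]) -> str | None: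
--     # Flatten the recursion: enumerate every candidate A would ever try, in
--     # A's exact order, then return the first one present in all_ids.
--     parts = section_id.split(".")
--     candidates = []
--     for k in range(len(parts) - 1, 0, -1):
--         prefix = ".".join(parts[:k])
--         seg = parts[k]
--         for i in range(len(seg) - 1, 0, -1):
--             candidates.append(prefix + "." + seg[:i])
--         candidates.append(prefix)
--     return next((c for c in candidates if c in all_ids), None)
-- ===== Notes on version B (the rewrite author's own statement) =====
-- stated objective: alternative
-- what changed: A's self-recursion up the dot hierarchy is replaced by a single flat pass that enumerates every candidate id A would ever try (in A's exact order) and returns the first one present in all_ids.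
import Mathlib
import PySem

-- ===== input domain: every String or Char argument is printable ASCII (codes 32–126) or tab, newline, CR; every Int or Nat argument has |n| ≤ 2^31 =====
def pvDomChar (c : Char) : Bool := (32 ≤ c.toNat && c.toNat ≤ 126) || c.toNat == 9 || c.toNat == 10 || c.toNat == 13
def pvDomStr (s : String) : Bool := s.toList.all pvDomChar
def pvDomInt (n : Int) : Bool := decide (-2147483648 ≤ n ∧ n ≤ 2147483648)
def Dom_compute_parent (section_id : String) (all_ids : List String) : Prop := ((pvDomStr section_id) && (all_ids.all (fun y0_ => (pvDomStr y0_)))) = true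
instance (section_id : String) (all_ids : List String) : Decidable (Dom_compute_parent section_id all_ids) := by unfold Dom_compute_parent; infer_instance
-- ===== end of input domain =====

-- B replaces A's self-recursion up the dot hierarchy by one flat pass: it enumerates
-- every candidate id A would ever try, in A's order, and returns the first one
-- present in all_ids (objective: alternative decomposition, same cost).

-- ===== PORT A =====
-- Both ports work on the List Char / List (List Char) side of the PySem bridge;
-- the String-level entry points wrap them via toList/ofList.
-- The lemmas before pvCpA exist only because pvCpA's `decreasing_by` cites
-- pvPrefix_lt: the prefix passed to the recursive call is strictly shorter.

def pvSdot : List Char → List (List Char)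
  | [] => [[]]
  | c :: rest =>
    if c = '.' then [] :: pvSdot rest
    else
      match pvSdot rest with
      | [] => [[c]]
      | h :: t => (c :: h) :: t

theorem pvSdot_ne_nil (cs : List Char) : pvSdot cs ≠ [] := by
  induction cs with
  | nil => simp [pvSdot]
  | cons c rest ih =>
    simp only [pvSdot]
    split
    · simp
    · cases h : pvSdot rest <;> simp

theorem pvSdot_dot (rest : List Char) : pvSdot ('.' :: rest) = [] :: pvSdot rest := by
  simp [pvSdot]

theorem pvSdot_cons (c : Char) (rest h : List Char) (t : List (List Char))
    (hc : c ≠ '.') (hr : pvSdot rest = h :: t) : pvSdot (c :: rest) = (c :: h) :: t := by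
  simp [pvSdot, hc, hr]

theorem pvGo_spec (fuel : Nat) (l cur : List Char) (acc : List (List Char))
    (h : l.length < fuel) (hd : List Char) (tl : List (List Char))
    (hsd : pvSdot l = hd :: tl) :
    PySem.Chars.splitOn.go ['.'] fuel l cur acc = acc.reverse ++ (cur.reverse ++ hd) :: tl := by
  induction l generalizing fuel cur acc hd tl with
  | nil =>
    cases fuel with
    | zero => omega
    | succ f =>
      rw [PySem.Chars.splitOn.go.eq_def]
      simp only [pvSdot] at hsd
      injection hsd with h1 h2
      simp [← h1, ← h2]
  | cons c rest ih =>
    cases fuel with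
    | zero => omega
    | succ f =>
      rw [PySem.Chars.splitOn.go.eq_def]
      by_cases hc : c = '.'
      · subst hc
        have hpre : List.isPrefixOf ['.'] ('.' :: rest) = true := by simp [List.isPrefixOf]
        simp only [hpre, if_pos]
        rw [pvSdot_dot] at hsd
        cases hsd' : pvSdot rest with
        | nil => exact absurd hsd' (pvSdot_ne_nil rest)
        | cons h2 t2 =>
          rw [hsd'] at hsd
          injection hsd with e1 e2
          rw [show List.drop (List.length ['.']) ('.' :: rest) = rest by simp]
          rw [ih f [] (cur.reverse :: acc) (by simp at h ⊢; omega) h2 t2 hsd']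
          simp [← e1, ← e2]
      · have hpre : List.isPrefixOf ['.'] (c :: rest) = false := by
          simp [List.isPrefixOf]
          exact fun hh => absurd hh.symm hc
        simp only [hpre, Bool.false_eq_true, if_false]
        cases hsd' : pvSdot rest with
        | nil => exact absurd hsd' (pvSdot_ne_nil rest)
        | cons h2 t2 =>
          rw [pvSdot_cons c rest h2 t2 hc hsd'] at hsd
          injection hsd with e1 e2
          rw [ih f (c :: cur) acc (by simp at h ⊢; omega) h2 t2 hsd']
          simp [← e1, ← e2]

theorem pvSplitOn_eq_sdot (s : List Char) : PySem.Chars.splitOn s ['.'] = pvSdot s := by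
  cases hsd : pvSdot s with
  | nil => exact absurd hsd (pvSdot_ne_nil s)
  | cons hd tl =>
    unfold PySem.Chars.splitOn
    rw [pvGo_spec (s.length + 1) s [] [] (by omega) hd tl hsd]
    simp

theorem pvIc_cons2 (sep x y : List Char) (l : List (List Char)) :
    sep.intercalate (x :: y :: l) = x ++ sep ++ sep.intercalate (y :: l) := by
  simp [List.intercalate, List.intersperse]

theorem pvIc_single (sep x : List Char) : sep.intercalate [x] = x := by
  simp [List.intercalate]

theorem pvIc_sdot (cs : List Char) : List.intercalate ['.'] (pvSdot cs) = cs := by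
  induction cs with
  | nil => simp [pvSdot, pvIc_single]
  | cons c rest ih =>
    cases hsd : pvSdot rest with
    | nil => exact absurd hsd (pvSdot_ne_nil rest)
    | cons h t =>
      rw [hsd] at ih
      by_cases hc : c = '.'
      · subst hc
        rw [pvSdot_dot, hsd, pvIc_cons2, ih]
        simp
      · rw [pvSdot_cons c rest h t hc hsd]
        cases t with
        | nil => rw [pvIc_single] at ih ⊢; simp [ih]
        | cons t1 ts => rw [pvIc_cons2] at ih ⊢; simp [← ih]

-- sdot of a dot-free chunk

theorem pvIc_dropLast_lt (l : List (List Char)) (h : 2 ≤ l.length) :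
    (List.intercalate ['.'] l.dropLast).length < (List.intercalate ['.'] l).length := by
  induction l with
  | nil => simp at h
  | cons c l' ih =>
    cases l' with
    | nil => simp at h
    | cons y ys =>
      cases hys : ys with
      | nil =>
        rw [show (c :: [y]).dropLast = [c] from rfl, pvIc_cons2, pvIc_single, pvIc_single]
        simp
      | cons z zs =>
        subst hys
        have ihh := ih (by simp)
        obtain ⟨w, ws, hw⟩ : ∃ w ws, (y :: z :: zs).dropLast = w :: ws := by
          cases zs <;> exact ⟨_, _, rfl⟩
        rw [show (c :: y :: z :: zs).dropLast = c :: (y :: z :: zs).dropLast from rfl]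
        rw [hw] at ihh ⊢
        rw [pvIc_cons2, pvIc_cons2]
        simp only [List.length_append]
        omega

theorem pvPrefix_lt (s : List Char) (h : ¬ (PySem.Chars.splitOn s ['.']).length = 1) :
    (PySem.Chars.join ['.'] (PySem.List.slice (PySem.Chars.splitOn s ['.']) none (some (-1)))).length < s.length := by
  rw [pvSplitOn_eq_sdot] at *
  rw [PySem.List.slice_to_neg_one]
  have h1 : pvSdot s ≠ [] := pvSdot_ne_nil s
  have h2 : 2 ≤ (pvSdot s).length := by
    rcases hl : (pvSdot s).length with _ | n
    · rw [List.length_eq_zero_iff] at hl; exact absurd hl h1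
    · rw [hl] at h; omega
  have := pvIc_dropLast_lt (pvSdot s) h2
  rw [pvIc_sdot] at this
  simpa [PySem.Chars.join] using this

def pvCpA (s : List Char) (ids : List (List Char)) : Option (List Char) :=
  let parts := PySem.Chars.splitOn s ['.']
  if hp : parts.length = 1 then none  -- top-level
  else
    let last := (PySem.List.pyGet? parts (-1)).getD []
    let pref := PySem.Chars.join ['.'] (PySem.List.slice parts none (some (-1)))
    match (PySem.List.pyRange ((last.length : Int) - 1) 0 (-1)).findSome?
        (fun i =>
          let candidate := pref ++ '.' :: PySem.List.slice last none (some i)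
          if ids.contains candidate then some candidate else none) with
    | some c => some c
    | none =>
      if ids.contains pref then some pref
      else if PySem.Chars.isIn ['.'] pref then pvCpA pref ids
      else none
termination_by s.length
decreasing_by exact pvPrefix_lt s hp

def compute_parent (section_id : String) (all_ids : List String) : Option String :=
  (pvCpA section_id.toList (all_ids.map String.toList)).map String.ofList

-- ===== PORT B =====
def pvCpB (s : List Char) (ids : List (List Char)) : Option (List Char) :=
  let parts := PySem.Chars.splitOn s ['.']
  let candidates :=
    (PySem.List.pyRange ((parts.length : Int) - 1) 0 (-1)).flatMap
      (fun k =>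
        let pref := PySem.Chars.join ['.'] (PySem.List.slice parts none (some k))
        let seg := (PySem.List.pyGet? parts k).getD []
        ((PySem.List.pyRange ((seg.length : Int) - 1) 0 (-1)).map
            (fun i => pref ++ '.' :: PySem.List.slice seg none (some i))) ++ [pref])
  candidates.find? (fun c => ids.contains c)

def compute_parent_alt (section_id : String) (all_ids : List String) : Option String :=
  (pvCpB section_id.toList (all_ids.map String.toList)).map String.ofList

-- ===== PRECONDITION & SPEC =====
def Spec_compute_parent (section_id : String) (all_ids : List String) (out : Option String) : Prop := out = compute_parent_alt section_id all_ids
instance (section_id : String) (all_ids : List String) (out : Option String) : Decidable (Spec_compute_parent section_id all_ids out) := by unfold Spec_compute_parent; infer_instance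

-- ===== CLAIM (what is proved, stated in full; the proofs are below) =====
def Claim_equal_compute_parent : Prop := ∀ (section_id : String) (all_ids : List String), Dom_compute_parent section_id all_ids → Spec_compute_parent section_id all_ids (compute_parent section_id all_ids)

-- ===== LEMMAS AND PROOFS =====

theorem pvSdot_nodot (c : List Char) (h : '.' ∉ c) : pvSdot c = [c] := by
  induction c with
  | nil => simp [pvSdot]
  | cons a c' ih =>
    simp at h
    exact pvSdot_cons a c' c' [] (fun e => absurd e.symm h.1) (ih h.2)

theorem pvSdot_chunk (c rest : List Char) (h : '.' ∉ c) :
    pvSdot (c ++ '.' :: rest) = c :: pvSdot rest := by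
  induction c with
  | nil => simp [pvSdot_dot]
  | cons a c' ih =>
    simp at h
    cases hsd : pvSdot (c' ++ '.' :: rest) with
    | nil => exact absurd hsd (pvSdot_ne_nil _)
    | cons h2 t2 =>
      rw [ih h.2] at hsd
      injection hsd with e1 e2
      rw [List.cons_append, pvSdot_cons a _ h2 t2 (fun e => absurd e.symm h.1) (by rw [ih h.2, ← e1, ← e2])]
      rw [e1, e2]

theorem pvSdot_no_dot (cs : List Char) : ∀ x ∈ pvSdot cs, '.' ∉ x := by
  induction cs with
  | nil => simp [pvSdot]
  | cons c rest ih =>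
    by_cases hc : c = '.'
    · subst hc; rw [pvSdot_dot]
      intro x hx
      rcases hx with _ | hx
      · simp
      · exact ih x (by assumption)
    · cases hsd : pvSdot rest with
      | nil => exact absurd hsd (pvSdot_ne_nil rest)
      | cons h t =>
        rw [pvSdot_cons c rest h t hc hsd]
        intro x hx
        rcases hx with _ | hx
        · have hh := ih (h) (by rw [hsd]; exact List.mem_cons_self)
          simp [hh]
          exact fun e => hc e.symm
        · exact ih x (by rw [hsd]; exact List.mem_cons_of_mem _ (by assumption))

theorem pvSdot_ic (l : List (List Char)) (hne : l ≠ []) (hd : ∀ x ∈ l, '.' ∉ x) :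
    pvSdot (List.intercalate ['.'] l) = l := by
  induction l with
  | nil => exact absurd rfl hne
  | cons c l' ih =>
    cases l' with
    | nil => rw [pvIc_single]; exact pvSdot_nodot c (hd c List.mem_cons_self)
    | cons y ys =>
      rw [pvIc_cons2]
      rw [List.append_assoc, List.singleton_append]
      rw [pvSdot_chunk _ _ (hd c List.mem_cons_self)]
      rw [ih (by simp) (fun x hx => hd x (List.mem_cons_of_mem _ hx))]

theorem pvDot_mem_ic (l : List (List Char)) (hne : l ≠ []) (hd : ∀ x ∈ l, '.' ∉ x) :
    ('.' ∈ List.intercalate ['.'] l ↔ 2 ≤ l.length) := by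
  cases l with
  | nil => exact absurd rfl hne
  | cons c l' =>
    cases l' with
    | nil =>
      rw [pvIc_single]
      simp only [List.length_singleton]
      constructor
      · intro h; exact absurd h (hd c List.mem_cons_self)
      · omega
    | cons y ys =>
      rw [pvIc_cons2]
      simp only [List.length_cons]
      constructor
      · intro _; omega
      · intro _; simp

theorem pvPyRange_down_zero : PySem.List.pyRange 0 0 (-1) = [] := by decide

theorem pvPyRange_down_succ (n : Nat) :
    PySem.List.pyRange ((n : Int) + 1) 0 (-1) = ((n : Int) + 1) :: PySem.List.pyRange (n : Int) 0 (-1) := by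
  unfold PySem.List.pyRange
  norm_num
  rw [show (if 0 < n then n else 0) = n by split <;> omega]
  rw [List.range_succ_eq_map, List.map_cons, List.map_map]
  refine congrArg₂ _ (by simp) ?_
  apply List.map_congr_left
  intro k _
  simp

theorem pvPyRange_down_mem (n : Nat) (k : Int) (hk : k ∈ PySem.List.pyRange (n : Int) 0 (-1)) :
    1 ≤ k ∧ k ≤ n := by
  induction n with
  | zero => simp only [Nat.cast_zero, pvPyRange_down_zero] at hk; simp at hk
  | succ m ih =>
    rw [show ((m + 1 : Nat) : Int) = (m : Int) + 1 by omega, pvPyRange_down_succ] at hk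
    rcases List.mem_cons.mp hk with h | h
    · omega
    · have := ih h; omega

theorem pvFindSome?_find? {ι α : Type} (l : List ι) (f : ι → α) (pred : α → Bool) :
    (l.findSome? fun i => if pred (f i) then some (f i) else none) = (l.map f).find? pred := by
  induction l with
  | nil => simp
  | cons a l' ih =>
    simp only [List.findSome?_cons, List.map_cons, List.find?_cons]
    by_cases h : pred (f a) <;> simp [h, ih]

theorem pvGetD_neg_one {α : Type} (xs : List α) (d : α) (h : xs ≠ []) :
    (PySem.List.pyGet? xs (-1)).getD d = xs.getLast h := by
  have hn : 1 ≤ xs.length := List.length_pos_iff.mpr h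
  simp only [PySem.List.pyGet?, PySem.List.pyIdx?]
  rw [if_neg (by omega), if_pos (by omega)]
  have : xs.length - (-(-1 : Int)).toNat = xs.length - 1 := by norm_num
  rw [this, Option.bind_some, List.getElem?_eq_getElem (by omega)]
  simp [List.getLast_eq_getElem]

theorem pvMainAux (N : Nat) : ∀ (s : List Char), s.length ≤ N → ∀ (ids : List (List Char)),
    pvCpA s ids = pvCpB s ids := by
  induction N with
  | zero =>
    intro s hs ids
    have hs0 : s = [] := List.eq_nil_of_length_eq_zero (by omega)
    subst hs0
    rw [pvCpA, pvCpB]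
    norm_num [pvSplitOn_eq_sdot, pvSdot, pvPyRange_down_zero]
  | succ M ih =>
    intro s hs ids
    rw [pvCpA, pvCpB]
    simp only [pvSplitOn_eq_sdot]
    set p := pvSdot s with hp
    have hpne : p ≠ [] := pvSdot_ne_nil s
    by_cases h1 : p.length = 1
    · rw [dif_pos h1, h1]
      norm_num [pvPyRange_down_zero]
    · rw [dif_neg h1]
      have hplen : 2 ≤ p.length := by
        have : p.length ≠ 0 := by simpa [List.length_eq_zero_iff] using hpne
        omega
      set a := p.getLast hpne with ha
      set q := p.dropLast with hqdef
      have hpq : q ++ [a] = p := List.dropLast_append_getLast hpne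
      have hql : q.length + 1 = p.length := by
        rw [← hpq]; simp
      -- LHS pieces
      rw [pvGetD_neg_one p [] hpne, PySem.List.slice_to_neg_one]
      -- RHS range decomposition
      have hm : PySem.List.pyRange ((p.length : Int) - 1) 0 (-1)
          = ((p.length : Int) - 1) :: PySem.List.pyRange ((p.length - 2 : Nat) : Int) 0 (-1) := by
        have h2 := pvPyRange_down_succ (p.length - 2)
        rw [show ((p.length - 2 : Nat) : Int) + 1 = (p.length : Int) - 1 by omega] at h2
        exact h2
      rw [hm, List.flatMap_cons]
      -- the head level of B
      rw [show ((p.length : Int) - 1) = ((p.length - 1 : Nat) : Int) by omega]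
      rw [PySem.List.slice_to_natCast, PySem.List.pyGet?_natCast, ← List.dropLast_eq_take, ← hqdef]
      rw [List.getElem?_eq_getElem (by omega), List.getLast_eq_getElem hpne]
      simp only [Option.getD_some]
      -- align A's scan with B's head level
      rw [pvFindSome?_find? (PySem.List.pyRange (((p[p.length - 1].length : Int)) - 1) 0 (-1))
        (fun i => PySem.Chars.join ['.'] q ++ '.' :: PySem.List.slice p[p.length - 1] none (some i))
        (fun c => ids.contains c)]
      rw [List.append_assoc, List.find?_append]
      cases hfs : (List.find? (fun c => ids.contains c)
          ((PySem.List.pyRange (((p[p.length - 1].length : Int)) - 1) 0 (-1)).map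
            (fun i => PySem.Chars.join ['.'] q ++ '.' :: PySem.List.slice p[p.length - 1] none (some i)))) with
      | some c => rfl
      | none =>
        simp only [Option.none_or]
        rw [List.find?_append, List.find?_singleton]
        by_cases hc : ids.contains (PySem.Chars.join ['.'] q)
        · rw [if_pos hc, if_pos hc]
          rfl
        · simp only [hc, Bool.false_eq_true, if_false, Option.none_or]
          have hqne : q ≠ [] := by
            intro e; rw [e] at hql; simp at hql; omega
          have hnodot : ∀ x ∈ q, '.' ∉ x := fun x hx =>
            pvSdot_no_dot s x (by rw [← hp]; exact List.mem_of_mem_dropLast hx)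
          have hic : PySem.Chars.join ['.'] q = List.intercalate ['.'] q := rfl
          have hisin : PySem.Chars.isIn ['.'] (PySem.Chars.join ['.'] q) = true ↔ 2 ≤ q.length := by
            rw [PySem.Chars.isIn_iff_infix, hic, List.singleton_infix_iff]
            exact pvDot_mem_ic q hqne hnodot
          by_cases hq2 : 2 ≤ q.length
          · rw [if_pos (hisin.mpr hq2)]
            have hlen_lt : (PySem.Chars.join ['.'] q).length < s.length := by
              have h3 := pvIc_dropLast_lt p hplen
              rw [hp, pvIc_sdot] at h3
              exact h3
            rw [ih (PySem.Chars.join ['.'] q) (by omega) ids, pvCpB]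
            simp only [pvSplitOn_eq_sdot, hic]
            rw [pvSdot_ic q hqne hnodot]
            rw [show ((q.length : Int) - 1) = ((p.length - 2 : Nat) : Int) by omega]
            -- congruence of the two flatMaps
            rw [List.flatMap_def, List.flatMap_def]
            refine congrArg (List.find? (fun c => ids.contains c)) (congrArg List.flatten ?_)
            apply List.map_congr_left
            intro k hk
            have hkb := pvPyRange_down_mem (p.length - 2) k hk
            have hkn : k = ((k.toNat : Nat) : Int) := by omega
            rw [hkn, PySem.List.slice_to_natCast, PySem.List.slice_to_natCast,
              PySem.List.pyGet?_natCast, PySem.List.pyGet?_natCast]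
            have hkq : k.toNat < q.length := by omega
            rw [← hpq, List.take_append_of_le_length (by omega), List.getElem?_append_left hkq]
          · rw [if_neg (by rw [hisin]; omega)]
            have hq1 : q.length = 1 := by omega
            have hz : p.length - 2 = 0 := by omega
            rw [hz]
            norm_num [pvPyRange_down_zero]

theorem pvMain (s : List Char) (ids : List (List Char)) : pvCpA s ids = pvCpB s ids :=
  pvMainAux s.length s le_rfl ids

-- ===== VERDICT (by name: the statement is the Claim_ definition above) =====
theorem compute_parent_spec : Claim_equal_compute_parent := by
  intro section_id all_ids _
  unfold Spec_compute_parent compute_parent compute_parent_alt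
  rw [pvMain]
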